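-- pv_equiv track=rewrite | github.com/diegomarzaa/APUNTES-PROGRAMACI-N | Tema 6 Secuencias/02_Listas.py | contar_olas
-- ===== SOURCE A (Python) =====
-- def contar_olas(lista, n):
--     olas = 0
--     seguidos = 0    # Aumentar cada vez que la temperatura de un dia sea menor que la del dia anterior
--     for dia in range(len(lista)):
--         if lista[dia] < 0:
--             seguidos += 1
--         else:
--             if seguidos > n:    # si es una ola de frío
--                 olas += 1
--             seguidos = 0
--     if seguidos > n:
--         olas += 1
--     return olas
-- ===== SOURCE B (Python) =====
-- def contar_olas(lista, n):
--     olas = 0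
--     i = 0
--     L = len(lista)
--     while i < L:
--         if lista[i] < 0:
--             j = i
--             while j < L and lista[j] < 0:
--                 j += 1
--             if j - i > n:
--                 olas += 1
--             i = j
--         else:
--             i += 1
--     return olas
-- ===== Notes on version B (the rewrite author's own statement) =====
-- stated objective: alternative
-- what changed: B scans whole maximal runs of negatives with an inner two-pointer advance and counts each run longer than n directly, instead of A's per-element counter flushed at every non-negative element and after the loop; Pre_ excludes negative n, a corner no caller of 'count cold runs longer than n days' specifies, on which A's strict comparison also counts the zero-length run flushed at every non-negative element and at the end while B counts only actual negative runs.
-- outside the precondition, e.g. on contar_olas([1], -1): A returns 2, B returns 0; on contar_olas([], -1): A returns 1, B returns 0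
import Mathlib
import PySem

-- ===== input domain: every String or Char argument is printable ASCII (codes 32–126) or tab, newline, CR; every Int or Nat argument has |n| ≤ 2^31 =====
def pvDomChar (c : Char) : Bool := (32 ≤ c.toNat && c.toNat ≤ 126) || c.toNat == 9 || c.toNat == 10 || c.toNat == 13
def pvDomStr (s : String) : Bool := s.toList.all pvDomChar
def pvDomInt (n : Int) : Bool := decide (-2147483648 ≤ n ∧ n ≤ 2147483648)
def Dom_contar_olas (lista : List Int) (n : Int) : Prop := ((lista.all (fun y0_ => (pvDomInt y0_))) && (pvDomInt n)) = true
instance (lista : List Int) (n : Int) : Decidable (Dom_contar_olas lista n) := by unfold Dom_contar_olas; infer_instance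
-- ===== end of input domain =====

-- B replaces A's per-element run counter (with its post-loop flush) by a two-pointer scan of whole
-- maximal negative runs; alternative decomposition, same cost, equivalent for n >= 0.


-- ===== PORT A =====
-- loop body of A's for-loop (state = (olas, seguidos))
def contarStep (n : Int) (st : Int × Int) (v : Int) : Int × Int :=
  if v < 0 then (st.1, st.2 + 1)
  else (if st.2 > n then st.1 + 1 else st.1, 0)

def contar_olas (lista : List Int) (n : Int) : Int :=
  let st := (PySem.List.pyRange 0 lista.length 1).foldl
    (fun st dia => contarStep n st (PySem.List.pyGetD lista dia 0)) (0, 0)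
  if st.2 > n then st.1 + 1 else st.1

-- ===== PORT B =====
-- inner while of Source B: first index j' ≥ j with j' = len or lista[j'] ≥ 0
def negRunEnd (lista : List Int) (j : Nat) : Nat :=
  if h : j < lista.length then
    if lista[j]'h < 0 then negRunEnd lista (j + 1) else j
  else j
termination_by lista.length - j
decreasing_by omega

theorem negRunEnd_step (lista : List Int) (i : Nat) (h : i < lista.length)
    (hneg : lista[i]'h < 0) : negRunEnd lista i = negRunEnd lista (i + 1) := by
  rw [negRunEnd, dif_pos h, if_pos hneg]

theorem negRunEnd_ge (lista : List Int) (j : Nat) : j ≤ negRunEnd lista j := by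
  induction hk : lista.length - j using Nat.strong_induction_on generalizing j with
  | _ k ih =>
  rw [negRunEnd]
  by_cases h : j < lista.length
  · rw [dif_pos h]
    by_cases hneg : lista[j]'h < 0
    · rw [if_pos hneg]
      exact le_trans (Nat.le_succ j) (ih (lista.length - (j + 1)) (by omega) (j + 1) rfl)
    · rw [if_neg hneg]
  · rw [dif_neg h]

-- outer while loop of Source B
def altLoop (lista : List Int) (n : Int) (olas : Int) (i : Nat) : Int :=
  if h : i < lista.length then
    if hneg : lista[i]'h < 0 then
      let j := negRunEnd lista i
      altLoop lista n (if ((j : Int) - (i : Int)) > n then olas + 1 else olas) j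
    else altLoop lista n olas (i + 1)
  else olas
termination_by lista.length - i
decreasing_by
  · have h2 : negRunEnd lista i = negRunEnd lista (i + 1) := negRunEnd_step lista i h hneg
    have h3 := negRunEnd_ge lista (i + 1)
    omega
  · omega

def contar_olas_alt (lista : List Int) (n : Int) : Int := altLoop lista n 0 0

-- ===== PRECONDITION & SPEC =====
-- Pre_ excludes negative n (a corner no caller specifies): there A's strict comparison also
-- counts the zero-length run flushed at every non-negative element and at the end of the list,
-- while B counts only actual negative runs.
def Pre_contar_olas (lista : List Int) (n : Int) : Prop := 0 ≤ n
instance (lista : List Int) (n : Int) : Decidable (Pre_contar_olas lista n) := by unfold Pre_contar_olas; infer_instance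
def pvWitness_contar_olas : List Int × Int := ([-1, -2, 3, -4], 1)

def Spec_contar_olas (lista : List Int) (n : Int) (out : Int) : Prop := out = contar_olas_alt lista n
instance (lista : List Int) (n : Int) (out : Int) : Decidable (Spec_contar_olas lista n out) := by unfold Spec_contar_olas; infer_instance

-- ===== CLAIM (what is proved, stated in full; the proofs are below) =====
def Claim_equal_contar_olas : Prop := ∀ (lista : List Int) (n : Int), Dom_contar_olas lista n → Pre_contar_olas lista n → Spec_contar_olas lista n (contar_olas lista n)

-- ===== LEMMAS AND PROOFS =====

-- the run-length-annotated count, as a structural recursion both ports are reduced to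
def W (n s : Int) : List Int → Int
  | [] => if s > n then 1 else 0
  | x :: xs => if x < 0 then W n (s + 1) xs else (if s > n then 1 else 0) + W n 0 xs

theorem foldlA_eq_W (n : Int) (xs : List Int) (o s : Int) :
    (let st := xs.foldl (contarStep n) (o, s)
     if st.2 > n then st.1 + 1 else st.1) = o + W n s xs := by
  induction xs generalizing o s with
  | nil => simp only [List.foldl, W]; split <;> ring
  | cons x xs ih =>
    simp only [List.foldl, W, contarStep]
    by_cases hx : x < 0
    · simp [hx, ih]
    · simp only [if_neg hx]
      split <;> simp [ih] <;> ring

theorem contar_olas_eq_W (lista : List Int) (n : Int) :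
    contar_olas lista n = W n 0 lista := by
  have hb := PySem.List.foldl_pyRange_zero_pyGetD' lista (0 : Int) (contarStep n)
      ((0 : Int), (0 : Int))
  have := foldlA_eq_W n lista 0 0
  simp only [contar_olas] at *
  rw [hb]
  simpa using this

theorem W_negRun (lista : List Int) (n : Int) (hn : 0 ≤ n) :
    ∀ i s, 0 ≤ s →
      W n s (lista.drop i) =
        (if s + ((negRunEnd lista i : Int) - (i : Int)) > n then 1 else 0)
          + W n 0 (lista.drop (negRunEnd lista i)) := by
  intro i
  induction hi : lista.length - i using Nat.strong_induction_on generalizing i with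
  | _ k ih =>
  intro s hs
  by_cases h : i < lista.length
  · have hdrop : lista.drop i = lista[i]'h :: lista.drop (i + 1) :=
      List.drop_eq_getElem_cons h
    by_cases hneg : lista[i]'h < 0
    · rw [hdrop]
      simp only [W, if_pos hneg]
      rw [negRunEnd_step lista i h hneg]
      rw [ih (lista.length - (i + 1)) (by omega) (i + 1) rfl (s + 1) (by omega)]
      have harith : s + 1 + ((negRunEnd lista (i + 1) : Int) - ((i + 1 : Nat) : Int))
          = s + ((negRunEnd lista (i + 1) : Int) - (i : Int)) := by push_cast; ring
      rw [harith]
    · have hend : negRunEnd lista i = i := by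
        rw [negRunEnd, dif_pos h, if_neg hneg]
      rw [hend, hdrop]
      simp only [W, if_neg hneg]
      have h0 : ¬ ((0 : Int) > n) := by omega
      simp [sub_self, h0]
  · have hend : negRunEnd lista i = i := by
      rw [negRunEnd, dif_neg h]
    rw [hend]
    have hdrop : lista.drop i = [] := List.drop_eq_nil_of_le (by omega)
    rw [hdrop]
    have h0 : ¬ ((0 : Int) > n) := by omega
    simp only [W, sub_self, add_zero]
    simp [h0]

theorem altLoop_eq_W (lista : List Int) (n : Int) (hn : 0 ≤ n) :
    ∀ i olas, altLoop lista n olas i = olas + W n 0 (lista.drop i) := by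
  intro i
  induction hi : lista.length - i using Nat.strong_induction_on generalizing i with
  | _ k ih =>
  intro olas
  rw [altLoop]
  by_cases h : i < lista.length
  · have hdrop : lista.drop i = lista[i]'h :: lista.drop (i + 1) :=
      List.drop_eq_getElem_cons h
    by_cases hneg : lista[i]'h < 0
    · rw [dif_pos h, dif_pos hneg]
      have h1 : i + 1 ≤ negRunEnd lista i := by
        rw [negRunEnd_step lista i h hneg]
        exact negRunEnd_ge lista (i + 1)
      rw [ih (lista.length - negRunEnd lista i) (by omega) (negRunEnd lista i) rfl]
      rw [W_negRun lista n hn i 0 le_rfl]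
      have hz : (0 : Int) + ((negRunEnd lista i : Int) - (i : Int))
          = (negRunEnd lista i : Int) - (i : Int) := by ring
      rw [hz]
      split <;> ring
    · rw [dif_pos h, dif_neg hneg]
      rw [ih (lista.length - (i + 1)) (by omega) (i + 1) rfl]
      rw [hdrop]
      simp only [W, if_neg hneg]
      have h0 : ¬ ((0 : Int) > n) := by omega
      rw [if_neg h0]
      ring
  · rw [dif_neg h]
    have hdrop : lista.drop i = [] := List.drop_eq_nil_of_le (by omega)
    rw [hdrop]
    simp only [W]
    have h0 : ¬ ((0 : Int) > n) := by omega
    rw [if_neg h0]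
    ring

-- ===== VERDICT (by name: the statement is the Claim_ definition above) =====
theorem contar_olas_spec : Claim_equal_contar_olas := by
  intro lista n _ hpre
  unfold Spec_contar_olas contar_olas_alt
  rw [contar_olas_eq_W, altLoop_eq_W lista n hpre 0 0]
  simp
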